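-- pv_equiv track=rewrite | github.com/yofchio/Multi-Agent-Warehouse-Robot-Planner | backend/algorithms/astar.py | _goal_safe_after
-- ===== SOURCE A (Python) =====
-- from typing import Dict, List, Optional, Set, Tuple
--
-- def _goal_safe_after(
--     goal: Tuple[int, int],
--     arrival_time: int,
--     occupied_at: Dict[int, Set[Tuple[int, int]]],
--     max_time: int,
-- ) -> bool:
--     """Check that no other agent occupies *goal* at any time >= arrival_time."""
--     for t in range(arrival_time, max_time + 1):
--         if goal in occupied_at.get(t, set()):
--             return False
--     return True
-- ===== SOURCE B (Python) =====
-- def _goal_safe_after(goal, arrival_time, occupied_at, max_time):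
--     """Check that no other agent occupies *goal* at any time >= arrival_time."""
--     blocked_times = [t for t, cells in occupied_at.items() if goal in cells]
--     return all(t < arrival_time or t > max_time for t in blocked_times)
-- ===== Notes on version B (the rewrite author's own statement) =====
-- stated objective: alternative
-- what changed: B first collects the list of times at which the goal cell is occupied at all, then checks that every such time lies outside the [arrival_time, max_time] window, instead of scanning every integer time step of the window and probing the dict for each.
import Mathlib
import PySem

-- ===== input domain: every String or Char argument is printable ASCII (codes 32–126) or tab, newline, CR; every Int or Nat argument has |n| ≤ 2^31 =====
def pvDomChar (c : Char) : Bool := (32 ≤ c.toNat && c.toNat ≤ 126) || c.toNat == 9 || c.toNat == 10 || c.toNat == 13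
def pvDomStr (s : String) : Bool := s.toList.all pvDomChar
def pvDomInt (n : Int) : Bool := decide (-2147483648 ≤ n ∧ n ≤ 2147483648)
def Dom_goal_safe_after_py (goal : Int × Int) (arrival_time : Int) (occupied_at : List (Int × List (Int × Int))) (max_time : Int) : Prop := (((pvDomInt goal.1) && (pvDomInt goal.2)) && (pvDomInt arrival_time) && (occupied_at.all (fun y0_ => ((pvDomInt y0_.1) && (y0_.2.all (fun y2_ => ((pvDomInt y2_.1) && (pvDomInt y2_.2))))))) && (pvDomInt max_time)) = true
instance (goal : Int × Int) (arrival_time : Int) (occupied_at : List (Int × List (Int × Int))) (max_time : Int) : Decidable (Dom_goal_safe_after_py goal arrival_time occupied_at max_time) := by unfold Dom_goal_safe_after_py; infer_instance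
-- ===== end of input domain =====

-- B is a two-stage pipeline: first collect the times at which the goal cell is occupied at
-- all, then check that each lies outside the [arrival_time, max_time] window — instead of
-- A's loop over every integer time step probing the dict. Equivalence is proved for
-- duplicate-free keys (every Python dict); return value only, no mutation.

-- ===== PORT A =====
-- for t in range(arrival_time, max_time + 1): if goal in occupied_at.get(t, set()): return False
def goalSafeLoopA (goal : Int × Int) (occupied_at : List (Int × List (Int × Int))) : List Int → Bool
  | [] => true
  | t :: ts =>
    if goal ∈ (PySem.Dict.mk occupied_at).getD t [] then false
    else goalSafeLoopA goal occupied_at ts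

def goal_safe_after_py (goal : Int × Int) (arrival_time : Int) (occupied_at : List (Int × List (Int × Int))) (max_time : Int) : Bool :=
  goalSafeLoopA goal occupied_at (PySem.List.pyRange arrival_time (max_time + 1) 1)

-- ===== PORT B =====
-- blocked_times = [t for t, cells in items if goal in cells]; all(t < a or t > m for t in blocked_times)
def goal_safe_after_py_alt (goal : Int × Int) (arrival_time : Int) (occupied_at : List (Int × List (Int × Int))) (max_time : Int) : Bool :=
  ((occupied_at.filter (fun p => decide (goal ∈ p.2))).map Prod.fst).all
    (fun t => decide (t < arrival_time) || decide (max_time < t))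

-- ===== PRECONDITION & SPEC =====
-- Pre_ requires distinct keys in the association list: a Python dict can never have duplicate
-- keys, so this excludes no input the Python function can receive.
def Pre_goal_safe_after_py (goal : Int × Int) (arrival_time : Int) (occupied_at : List (Int × List (Int × Int))) (max_time : Int) : Prop :=
  (occupied_at.map Prod.fst).Nodup
instance (goal : Int × Int) (arrival_time : Int) (occupied_at : List (Int × List (Int × Int))) (max_time : Int) : Decidable (Pre_goal_safe_after_py goal arrival_time occupied_at max_time) := by unfold Pre_goal_safe_after_py; infer_instance

def pvWitness_goal_safe_after_py : (Int × Int) × Int × (List (Int × List (Int × Int))) × Int :=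
  ((0, 0), 0, [(1, [(1, 1)]), (2, [(0, 0)])], 3)

def Spec_goal_safe_after_py (goal : Int × Int) (arrival_time : Int) (occupied_at : List (Int × List (Int × Int))) (max_time : Int) (out : Bool) : Prop := out = goal_safe_after_py_alt goal arrival_time occupied_at max_time
instance (goal : Int × Int) (arrival_time : Int) (occupied_at : List (Int × List (Int × Int))) (max_time : Int) (out : Bool) : Decidable (Spec_goal_safe_after_py goal arrival_time occupied_at max_time out) := by unfold Spec_goal_safe_after_py; infer_instance

-- ===== CLAIM (what is proved, stated in full; the proofs are below) =====
def Claim_equal_goal_safe_after_py : Prop := ∀ (goal : Int × Int) (arrival_time : Int) (occupied_at : List (Int × List (Int × Int))) (max_time : Int), Dom_goal_safe_after_py goal arrival_time occupied_at max_time → Pre_goal_safe_after_py goal arrival_time occupied_at max_time → Spec_goal_safe_after_py goal arrival_time occupied_at max_time (goal_safe_after_py goal arrival_time occupied_at max_time)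

-- ===== LEMMAS AND PROOFS =====

lemma goalSafeLoopA_eq_true (goal : Int × Int) (occ : List (Int × List (Int × Int))) (ts : List Int) :
    goalSafeLoopA goal occ ts = true ↔ ∀ t ∈ ts, goal ∉ (PySem.Dict.mk occ).getD t [] := by
  induction ts with
  | nil => simp [goalSafeLoopA]
  | cons t ts ih => by_cases h : goal ∈ (PySem.Dict.mk occ).getD t [] <;> simp [goalSafeLoopA, h, ih]

lemma altB_eq_true (goal : Int × Int) (a m : Int) (l : List (Int × List (Int × Int))) :
    goal_safe_after_py_alt goal a l m = true ↔ ∀ p ∈ l, ¬ (a ≤ p.1 ∧ p.1 ≤ m ∧ goal ∈ p.2) := by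
  unfold goal_safe_after_py_alt
  simp only [List.all_eq_true, List.mem_map, List.mem_filter]
  constructor
  · rintro h ⟨t, cells⟩ hp ⟨h1, h2, h3⟩
    have := h t ⟨(t, cells), ⟨hp, by simpa using h3⟩, rfl⟩
    simp at this
    omega
  · rintro h t ⟨⟨t', cells⟩, ⟨hmem, hg⟩, rfl⟩
    simp only [decide_eq_true_eq] at hg
    have := h (t', cells) hmem
    simp only [decide_eq_true_eq, Bool.or_eq_true]
    by_contra hc
    push_neg at hc
    exact this ⟨by omega, by omega, hg⟩

lemma bridge (goal : Int × Int) (a m : Int) (occ : List (Int × List (Int × Int)))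
    (hnd : (occ.map Prod.fst).Nodup) :
    (∀ t ∈ PySem.List.pyRange a (m + 1) 1, goal ∉ (PySem.Dict.mk occ).getD t []) ↔
      ∀ p ∈ occ, ¬ (a ≤ p.1 ∧ p.1 ≤ m ∧ goal ∈ p.2) := by
  have hkeys : ((PySem.Dict.mk occ).keys).Nodup := by simpa [PySem.Dict.keys] using hnd
  constructor
  · rintro h ⟨t, cells⟩ hp ⟨h1, h2, h3⟩
    have hg : (PySem.Dict.mk occ).getD t [] = cells :=
      PySem.Dict.getD_of_mem_items (d := PySem.Dict.mk occ) hp hkeys []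
    exact h t (PySem.List.mem_pyRange_one.mpr ⟨h1, by omega⟩) (hg ▸ h3)
  · intro h t ht hg
    have hw := PySem.List.mem_pyRange_one.mp ht
    rcases hget : (PySem.Dict.mk occ).get? t with _ | cells
    · simp [PySem.Dict.getD_of_get?_eq_none (PySem.Dict.mk occ) [] hget] at hg
    · have hmem : (t, cells) ∈ occ :=
        PySem.Dict.mem_items_of_get?_eq_some (d := PySem.Dict.mk occ) hget
      have : (PySem.Dict.mk occ).getD t [] = cells :=
        PySem.Dict.getD_of_get?_eq_some (PySem.Dict.mk occ) [] hget
      exact h (t, cells) hmem ⟨hw.1, by omega, this ▸ hg⟩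

-- ===== VERDICT (by name: the statement is the Claim_ definition above) =====
theorem goal_safe_after_py_spec : Claim_equal_goal_safe_after_py := by
  intro goal a occ m _ hpre
  unfold Spec_goal_safe_after_py goal_safe_after_py
  rw [Bool.eq_iff_iff, goalSafeLoopA_eq_true, altB_eq_true]
  exact bridge goal a m occ hpre
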